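-- pv_equiv track=rewrite | github.com/gaxiangchong/Numerology | NumberEnergy/mysite/app.py | convert_alpha_to_numbers
-- ===== SOURCE A (Python) =====
-- def convert_alpha_to_numbers(input_data):
--     # Convert alphabetic characters to their corresponding numbers
--     converted_input = []
--     for char in str(input_data):
--         if char == ' ':
--             continue  # Skip spaces
--         if char.isalpha():
--             # Convert lowercase or uppercase letters to numbers (a=1, b=2, ..., z=26)
--             converted_input.append(str(ord(char.lower()) - ord('a') + 1))
--         else:
--             converted_input.append(char)  # Keep non-alphabetic characters as is
--     return ''.join(converted_input)
-- ===== SOURCE B (Python) =====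
-- def convert_alpha_to_numbers(input_data):
--     # Build one translation table up front: delete ' ', map each letter
--     # (both cases) to its position string; then translate in a single pass.
--     table = {ord(' '): None}
--     for i, c in enumerate('abcdefghijklmnopqrstuvwxyz'):
--         v = str(i + 1)
--         table[ord(c)] = v
--         table[ord(c.upper())] = v
--     return str(input_data).translate(table)
-- ===== Notes on version B (the rewrite author's own statement) =====
-- stated objective: idiomatic
-- what changed: Replaces the per-character if/elif branching with a translation table (dict of ordinals, built once) applied in one pass via str.translate.
import Mathlib
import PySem

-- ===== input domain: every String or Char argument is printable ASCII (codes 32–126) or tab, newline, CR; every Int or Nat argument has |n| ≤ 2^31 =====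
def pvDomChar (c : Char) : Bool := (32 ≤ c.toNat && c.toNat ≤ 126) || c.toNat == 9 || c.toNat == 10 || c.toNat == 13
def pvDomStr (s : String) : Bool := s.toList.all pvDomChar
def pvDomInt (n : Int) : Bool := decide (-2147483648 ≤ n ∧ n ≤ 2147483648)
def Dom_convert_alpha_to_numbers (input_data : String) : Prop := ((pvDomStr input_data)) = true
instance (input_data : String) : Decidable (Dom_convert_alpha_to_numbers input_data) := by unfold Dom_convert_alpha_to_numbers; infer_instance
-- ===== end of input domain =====

-- B replaces A's per-character if/elif branching with a translation table built once
-- (ordinal -> replacement, ' ' deleted) applied in a single lookup pass (idiomatic).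

-- ===== PORT A =====
def convert_alpha_to_numbers (input_data : String) : String :=
  let converted_input := input_data.toList.foldl
    (fun acc char =>
      if char = ' ' then acc   -- continue: skip spaces
      else if PySem.Chars.isalpha char then
        acc ++ [PySem.Int.toStr (((PySem.Chars.lowerChar char).toNat : Int) - ('a'.toNat : Int) + 1)]
      else acc ++ [String.singleton char]) []
  PySem.Str.join "" converted_input

-- ===== PORT B =====
-- the translation table: ord ' ' ↦ None (delete), each letter's ordinal (both cases) ↦ position string
def pvTable_convert_alpha_to_numbers : PySem.Dict Nat (Option String) :=
  (PySem.List.enumerate "abcdefghijklmnopqrstuvwxyz".toList).foldl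
    (fun table ic =>
      let v := PySem.Int.toStr (ic.1 + 1)
      (table.insert ic.2.toNat (some v)).insert (PySem.Chars.upperChar ic.2).toNat (some v))
    (PySem.Dict.empty.insert (' '.toNat) none)

-- str.translate: per character, mapped-to-None ⇒ dropped, mapped-to-string ⇒ replaced, unmapped ⇒ kept
def convert_alpha_to_numbers_alt (input_data : String) : String :=
  PySem.Str.join "" (input_data.toList.filterMap (fun char =>
    match pvTable_convert_alpha_to_numbers.get? char.toNat with
    | some none => none
    | some (some s) => some s
    | none => some (String.singleton char)))

-- ===== PRECONDITION & SPEC =====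
def Spec_convert_alpha_to_numbers (input_data : String) (out : String) : Prop := out = convert_alpha_to_numbers_alt input_data
instance (input_data : String) (out : String) : Decidable (Spec_convert_alpha_to_numbers input_data out) := by unfold Spec_convert_alpha_to_numbers; infer_instance

-- ===== CLAIM (what is proved, stated in full; the proofs are below) =====
def Claim_equal_convert_alpha_to_numbers : Prop := ∀ (input_data : String), Dom_convert_alpha_to_numbers input_data → Spec_convert_alpha_to_numbers input_data (convert_alpha_to_numbers input_data)

-- ===== LEMMAS AND PROOFS =====

-- B's per-character lookup, as a function
def pvLookB (char : Char) : Option String :=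
  match pvTable_convert_alpha_to_numbers.get? char.toNat with
  | some none => none
  | some (some s) => some s
  | none => some (String.singleton char)

-- A's per-character decision, as an Option (none = the char is skipped)
def pvStepA (char : Char) : Option String :=
  if char = ' ' then none
  else if PySem.Chars.isalpha char then
    some (PySem.Int.toStr (((PySem.Chars.lowerChar char).toNat : Int) - ('a'.toNat : Int) + 1))
  else some (String.singleton char)

-- the table lookup agrees with A's branching on every character of the domain (finite check)
-- the table, computed once to a literal (insertion order: ' ' first, then lower/upper per letter)
def pvTableLit : PySem.Dict Nat (Option String) :=
  PySem.Dict.mk [(32, none), (97, some "1"), (65, some "1"), (98, some "2"), (66, some "2"), (99, some "3"), (67, some "3"), (100, some "4"), (68, some "4"), (101, some "5"), (69, some "5"), (102, some "6"), (70, some "6"), (103, some "7"), (71, some "7"), (104, some "8"), (72, some "8"), (105, some "9"), (73, some "9"), (106, some "10"), (74, some "10"), (107, some "11"), (75, some "11"), (108, some "12"), (76, some "12"), (109, some "13"), (77, some "13"), (110, some "14"), (78, some "14"), (111, some "15"), (79, some "15"), (112, some "16"), (80, some "16"), (113, some "17"), (81, some "17"), (114, some "18"), (82, some "18"), (115, some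 "19"), (83, some "19"), (116, some "20"), (84, some "20"), (117, some "21"), (85, some "21"), (118, some "22"), (86, some "22"), (119, some "23"), (87, some "23"), (120, some "24"), (88, some "24"), (121, some "25"), (89, some "25"), (122, some "26"), (90, some "26")]

set_option maxRecDepth 40000 in
lemma pvTable_eq_lit : pvTable_convert_alpha_to_numbers = pvTableLit := by decide

def pvLookLit (char : Char) : Option String :=
  match pvTableLit.get? char.toNat with
  | some none => none
  | some (some s) => some s
  | none => some (String.singleton char)

lemma pvLookB_eq_lit (c : Char) : pvLookB c = pvLookLit c := by
  unfold pvLookB pvLookLit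
  rw [pvTable_eq_lit]

set_option maxRecDepth 20000 in
lemma pvLook_eq_step_lt : ∀ n : Nat, n < 128 → pvLookLit (Char.ofNat n) = pvStepA (Char.ofNat n) := by
  decide

lemma pvLook_eq_step_lt' (n : Nat) (h : n < 128) : pvLookB (Char.ofNat n) = pvStepA (Char.ofNat n) := by
  rw [pvLookB_eq_lit]; exact pvLook_eq_step_lt n h

lemma pvLook_eq_step (c : Char) (h : pvDomChar c = true) : pvLookB c = pvStepA c := by
  have hlt : c.toNat < 128 := by
    simp only [pvDomChar, Bool.or_eq_true, Bool.and_eq_true, beq_iff_eq, decide_eq_true_eq] at h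
    omega
  have := pvLook_eq_step_lt' c.toNat hlt
  rwa [Char.ofNat_toNat] at this

-- A's fold accumulates exactly the filterMap of pvStepA
lemma pvFoldA_eq (cs : List Char) : ∀ acc : List String,
    cs.foldl (fun acc char =>
      if char = ' ' then acc
      else if PySem.Chars.isalpha char then
        acc ++ [PySem.Int.toStr (((PySem.Chars.lowerChar char).toNat : Int) - ('a'.toNat : Int) + 1)]
      else acc ++ [String.singleton char]) acc
    = acc ++ cs.filterMap pvStepA := by
  induction cs with
  | nil => intro acc; simp
  | cons c cs ih =>
    intro acc
    simp only [List.foldl_cons, List.filterMap_cons, ih, pvStepA]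
    split_ifs with h1 h2 <;> simp

-- ===== VERDICT (by name: the statement is the Claim_ definition above) =====
set_option maxRecDepth 20000 in
theorem convert_alpha_to_numbers_spec : Claim_equal_convert_alpha_to_numbers := by
  intro input_data hdom
  unfold Spec_convert_alpha_to_numbers convert_alpha_to_numbers convert_alpha_to_numbers_alt
  have hall : ∀ c ∈ input_data.toList, pvDomChar c = true := by
    simpa [Dom_convert_alpha_to_numbers, pvDomStr, List.all_eq_true] using hdom
  rw [pvFoldA_eq, List.nil_append]
  show PySem.Str.join "" (List.filterMap pvStepA input_data.toList) = _
  exact congrArg (PySem.Str.join "")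
    (List.filterMap_congr (fun c hc => by rw [← pvLook_eq_step c (hall c hc)]; rfl))
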